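-- pv_equiv track=rewrite | github.com/yuyanishimura0312/miratuku-news-v2 | scripts/analyze_gf_patterns.py | analyze_decision_archetypes
-- ===== SOURCE A (Python) =====
-- from collections import Counter, defaultdict
--
-- def analyze_decision_archetypes(structures):
--     """Classify 174 decision structures into recurring archetypes."""
--     archetypes = defaultdict(list)
--
--     for s in structures:
--         person = s.get("person_name_en", "")
--         event = s.get("event_title_en", "")
--         reasoning = s.get("reasoning_en", "")
--         chosen = s.get("chosen_action_en", "")
--         options = s.get("options_en", "")
--         speed = s.get("decision_speed", "")
--         constraints = s.get("constraints_en", "")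
--
--         # Classify by decision pattern
--         r_lower = reasoning.lower()
--         c_lower = chosen.lower()
--
--         if any(w in r_lower for w in ["risk", "gamble", "bold", "audacious", "daring"]):
--             archetypes["calculated_risk"].append({"person": person, "event": event, "reasoning": reasoning[:200]})
--         if any(w in r_lower for w in ["wait", "patience", "timing", "opportun"]):
--             archetypes["strategic_patience"].append({"person": person, "event": event, "reasoning": reasoning[:200]})
--         if any(w in r_lower for w in ["innovat", "new approach", "unconventional", "novel", "pioneer"]):
--             archetypes["creative_disruption"].append({"person": person, "event": event, "reasoning": reasoning[:200]})
--         if any(w in r_lower for w in ["unif", "consolidat", "merg", "integrat", "centrali"]):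
--             archetypes["unification_drive"].append({"person": person, "event": event, "reasoning": reasoning[:200]})
--         if any(w in r_lower for w in ["reform", "transform", "restructur", "overhaul"]):
--             archetypes["systemic_reform"].append({"person": person, "event": event, "reasoning": reasoning[:200]})
--         if any(w in r_lower for w in ["surviv", "necessit", "forced", "no choice", "desperat"]):
--             archetypes["survival_imperative"].append({"person": person, "event": event, "reasoning": reasoning[:200]})
--         if any(w in r_lower for w in ["alliance", "coalition", "partner", "collaborat"]):
--             archetypes["alliance_building"].append({"person": person, "event": event, "reasoning": reasoning[:200]})
--         if any(w in r_lower for w in ["legacy", "succession", "future generation", "long-term"]):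
--             archetypes["legacy_orientation"].append({"person": person, "event": event, "reasoning": reasoning[:200]})
--         if any(w in r_lower for w in ["moral", "ethic", "principle", "justice", "right"]):
--             archetypes["principled_stand"].append({"person": person, "event": event, "reasoning": reasoning[:200]})
--         if any(w in r_lower for w in ["adapt", "pivot", "adjust", "flexib", "pragmat"]):
--             archetypes["adaptive_pivot"].append({"person": person, "event": event, "reasoning": reasoning[:200]})
--
--     return archetypes
-- ===== SOURCE B (Python) =====
-- from collections import defaultdict
--
-- _ARCHETYPE_KEYWORDS = [
--     ("calculated_risk", ["risk", "gamble", "bold", "audacious", "daring"]),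
--     ("strategic_patience", ["wait", "patience", "timing", "opportun"]),
--     ("creative_disruption", ["innovat", "new approach", "unconventional", "novel", "pioneer"]),
--     ("unification_drive", ["unif", "consolidat", "merg", "integrat", "centrali"]),
--     ("systemic_reform", ["reform", "transform", "restructur", "overhaul"]),
--     ("survival_imperative", ["surviv", "necessit", "forced", "no choice", "desperat"]),
--     ("alliance_building", ["alliance", "coalition", "partner", "collaborat"]),
--     ("legacy_orientation", ["legacy", "succession", "future generation", "long-term"]),
--     ("principled_stand", ["moral", "ethic", "principle", "justice", "right"]),
--     ("adaptive_pivot", ["adapt", "pivot", "adjust", "flexib", "pragmat"]),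
-- ]
--
-- def _match_events(s):
--     """All (archetype, record) match events produced by one structure."""
--     reasoning = s.get("reasoning_en", "")
--     r_lower = reasoning.lower()
--     record = {
--         "person": s.get("person_name_en", ""),
--         "event": s.get("event_title_en", ""),
--         "reasoning": reasoning[:200],
--     }
--     return [(name, record) for name, words in _ARCHETYPE_KEYWORDS
--             if any(w in r_lower for w in words)]
--
-- def analyze_decision_archetypes(structures):
--     """Classify decision structures into archetypes via a flat event stream + group-by."""
--     # Phase 1: one flat stream of (archetype, record) match events.
--     events = [e for s in structures for e in _match_events(s)]
--     # Phase 2: group by archetype, keys in first-occurrence order.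
--     order = list(dict.fromkeys(name for name, _ in events))
--     result = defaultdict(list)
--     result.update((n, [rec for m, rec in events if m == n]) for n in order)
--     return result
-- ===== Notes on version B (the rewrite author's own statement) =====
-- stated objective: alternative
-- what changed: B replaces A's incremental dict-of-lists updates (ten conditional appends per structure) by a two-phase group-by: it first flattens all structures into one flat stream of (archetype, record) match events, then dedupes the event keys in first-occurrence order and builds each archetype's list by filtering the stream, constructing the result dict key-by-key at the end.
import Mathlib
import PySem

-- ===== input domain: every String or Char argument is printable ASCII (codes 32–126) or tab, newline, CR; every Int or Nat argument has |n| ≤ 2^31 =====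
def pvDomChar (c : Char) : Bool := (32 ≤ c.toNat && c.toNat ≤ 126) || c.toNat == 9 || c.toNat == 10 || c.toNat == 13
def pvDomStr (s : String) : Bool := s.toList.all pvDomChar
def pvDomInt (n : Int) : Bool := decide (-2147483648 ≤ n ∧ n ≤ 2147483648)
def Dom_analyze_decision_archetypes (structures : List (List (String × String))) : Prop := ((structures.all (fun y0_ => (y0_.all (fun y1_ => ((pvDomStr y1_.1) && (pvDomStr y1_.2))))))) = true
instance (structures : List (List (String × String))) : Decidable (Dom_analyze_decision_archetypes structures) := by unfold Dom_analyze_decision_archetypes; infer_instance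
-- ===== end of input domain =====

-- B replaces A's incremental dict-of-lists updates by a two-phase group-by over a flat (archetype, record)
-- match-event stream; objective: alternative (same cost, different algorithmic structure).
-- Both return a defaultdict(list); ported as its items list (insertion order).

-- ===== PORT A =====
def analyze_decision_archetypes (structures : List (List (String × String))) : List (String × List (List (String × String))) :=
  (structures.foldl (fun archetypes s =>
    let sd := PySem.Dict.mk s
    let person := sd.getD "person_name_en" ""
    let event := sd.getD "event_title_en" ""
    let reasoning := sd.getD "reasoning_en" ""
    let chosen := sd.getD "chosen_action_en" ""
    let _options := sd.getD "options_en" ""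
    let _speed := sd.getD "decision_speed" ""
    let _constraints := sd.getD "constraints_en" ""
    let r_lower := PySem.Str.lower reasoning
    let _c_lower := PySem.Str.lower chosen
    let archetypes := if ["risk", "gamble", "bold", "audacious", "daring"].any (fun w => PySem.Str.isIn w r_lower) then
      archetypes.modify "calculated_risk" [] (· ++ [[("person", person), ("event", event), ("reasoning", PySem.Str.slice reasoning none (some 200))]]) else archetypes
    let archetypes := if ["wait", "patience", "timing", "opportun"].any (fun w => PySem.Str.isIn w r_lower) then
      archetypes.modify "strategic_patience" [] (· ++ [[("person", person), ("event", event), ("reasoning", PySem.Str.slice reasoning none (some 200))]]) else archetypes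
    let archetypes := if ["innovat", "new approach", "unconventional", "novel", "pioneer"].any (fun w => PySem.Str.isIn w r_lower) then
      archetypes.modify "creative_disruption" [] (· ++ [[("person", person), ("event", event), ("reasoning", PySem.Str.slice reasoning none (some 200))]]) else archetypes
    let archetypes := if ["unif", "consolidat", "merg", "integrat", "centrali"].any (fun w => PySem.Str.isIn w r_lower) then
      archetypes.modify "unification_drive" [] (· ++ [[("person", person), ("event", event), ("reasoning", PySem.Str.slice reasoning none (some 200))]]) else archetypes
    let archetypes := if ["reform", "transform", "restructur", "overhaul"].any (fun w => PySem.Str.isIn w r_lower) then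
      archetypes.modify "systemic_reform" [] (· ++ [[("person", person), ("event", event), ("reasoning", PySem.Str.slice reasoning none (some 200))]]) else archetypes
    let archetypes := if ["surviv", "necessit", "forced", "no choice", "desperat"].any (fun w => PySem.Str.isIn w r_lower) then
      archetypes.modify "survival_imperative" [] (· ++ [[("person", person), ("event", event), ("reasoning", PySem.Str.slice reasoning none (some 200))]]) else archetypes
    let archetypes := if ["alliance", "coalition", "partner", "collaborat"].any (fun w => PySem.Str.isIn w r_lower) then
      archetypes.modify "alliance_building" [] (· ++ [[("person", person), ("event", event), ("reasoning", PySem.Str.slice reasoning none (some 200))]]) else archetypes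
    let archetypes := if ["legacy", "succession", "future generation", "long-term"].any (fun w => PySem.Str.isIn w r_lower) then
      archetypes.modify "legacy_orientation" [] (· ++ [[("person", person), ("event", event), ("reasoning", PySem.Str.slice reasoning none (some 200))]]) else archetypes
    let archetypes := if ["moral", "ethic", "principle", "justice", "right"].any (fun w => PySem.Str.isIn w r_lower) then
      archetypes.modify "principled_stand" [] (· ++ [[("person", person), ("event", event), ("reasoning", PySem.Str.slice reasoning none (some 200))]]) else archetypes
    let archetypes := if ["adapt", "pivot", "adjust", "flexib", "pragmat"].any (fun w => PySem.Str.isIn w r_lower) then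
      archetypes.modify "adaptive_pivot" [] (· ++ [[("person", person), ("event", event), ("reasoning", PySem.Str.slice reasoning none (some 200))]]) else archetypes
    archetypes) PySem.Dict.empty).items

-- ===== PORT B =====
def archetypeKeywords : List (String × List String) :=
  [("calculated_risk", ["risk", "gamble", "bold", "audacious", "daring"]),
   ("strategic_patience", ["wait", "patience", "timing", "opportun"]),
   ("creative_disruption", ["innovat", "new approach", "unconventional", "novel", "pioneer"]),
   ("unification_drive", ["unif", "consolidat", "merg", "integrat", "centrali"]),
   ("systemic_reform", ["reform", "transform", "restructur", "overhaul"]),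
   ("survival_imperative", ["surviv", "necessit", "forced", "no choice", "desperat"]),
   ("alliance_building", ["alliance", "coalition", "partner", "collaborat"]),
   ("legacy_orientation", ["legacy", "succession", "future generation", "long-term"]),
   ("principled_stand", ["moral", "ethic", "principle", "justice", "right"]),
   ("adaptive_pivot", ["adapt", "pivot", "adjust", "flexib", "pragmat"])]

-- all (archetype, record) match events produced by one structure
def matchEvents (s : List (String × String)) : List (String × List (String × String)) :=
  let sd := PySem.Dict.mk s
  let reasoning := sd.getD "reasoning_en" ""
  let r_lower := PySem.Str.lower reasoning
  let record := [("person", sd.getD "person_name_en" ""), ("event", sd.getD "event_title_en" ""),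
                 ("reasoning", PySem.Str.slice reasoning none (some 200))]
  archetypeKeywords.filterMap (fun nw =>
    if nw.2.any (fun w => PySem.Str.isIn w r_lower) then some (nw.1, record) else none)

def analyze_decision_archetypes_alt (structures : List (List (String × String))) : List (String × List (List (String × String))) :=
  let events := structures.flatMap matchEvents
  let order := PySem.List.dedup (events.map (·.1))
  order.map (fun n => (n, (events.filter (fun e => e.1 == n)).map (·.2)))

-- ===== PRECONDITION & SPEC =====
def Spec_analyze_decision_archetypes (structures : List (List (String × String))) (out : List (String × List (List (String × String)))) : Prop := out = analyze_decision_archetypes_alt structures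
instance (structures : List (List (String × String))) (out : List (String × List (List (String × String)))) : Decidable (Spec_analyze_decision_archetypes structures out) := by unfold Spec_analyze_decision_archetypes; infer_instance

-- ===== CLAIM =====
def Claim_equal_analyze_decision_archetypes : Prop := ∀ (structures : List (List (String × String))), Dom_analyze_decision_archetypes structures → Spec_analyze_decision_archetypes structures (analyze_decision_archetypes structures)

-- ===== LEMMAS AND PROOFS =====

-- the grouping step shared by the analysis below
def pvAppendStep (d : PySem.Dict String (List (List (String × String)))) (e : String × List (String × String)) : PySem.Dict String (List (List (String × String))) :=
  d.modify e.1 [] (· ++ [e.2])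

-- folding a filterMap-with-guard is folding the source with a guarded step
lemma foldl_filterMap_ite {α β γ : Type} (p : α → Bool) (h : α → β) (g : γ → β → γ) :
    ∀ (l : List α) (d : γ),
      (l.filterMap (fun x => if p x then some (h x) else none)).foldl g d
        = l.foldl (fun d x => if p x then g d (h x) else d) d := by
  intro l
  induction l with
  | nil => intro d; rfl
  | cons x xs ih =>
    intro d
    by_cases hp : p x = true <;> simp [hp, ih]

-- A's loop is the fold of pvAppendStep over the flat match-event stream
lemma A_eq_foldl_events (structures : List (List (String × String))) :
    analyze_decision_archetypes structures
      = ((structures.flatMap matchEvents).foldl pvAppendStep PySem.Dict.empty).items := by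
  unfold analyze_decision_archetypes
  congr 1
  rw [List.foldl_flatMap]
  apply PySem.List.foldl_congr_mem
  intro d s _
  show _ = (matchEvents s).foldl pvAppendStep d
  rw [matchEvents]
  rw [foldl_filterMap_ite (fun nw : String × List String => nw.2.any (fun w => PySem.Str.isIn w (PySem.Str.lower ((PySem.Dict.mk s).getD "reasoning_en" "")))) _ pvAppendStep]
  rfl

-- ===== VERDICT =====
theorem analyze_decision_archetypes_spec : Claim_equal_analyze_decision_archetypes := by
  intro structures _
  show analyze_decision_archetypes structures = analyze_decision_archetypes_alt structures
  rw [A_eq_foldl_events]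
  unfold analyze_decision_archetypes_alt pvAppendStep
  set events := structures.flatMap matchEvents with hev
  have hkeys : ((events.foldl (fun d e => d.modify e.1 [] (· ++ [e.2])) PySem.Dict.empty)).keys
      = PySem.List.dedup (events.map (·.1)) := by
    rw [PySem.Dict.keys_foldl_modify_key]
    simp [PySem.Dict.keys_empty, PySem.Set.update, PySem.Set.ofList_eq_foldl, PySem.List.dedup_eq_ofList]
  have hnd : ((events.foldl (fun d e => d.modify e.1 [] (· ++ [e.2])) PySem.Dict.empty)).keys.Nodup := by
    rw [hkeys]; exact PySem.List.nodup_dedup _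
  rw [PySem.Dict.items_eq_map_keys _ hnd []]
  rw [hkeys]
  apply List.map_congr_left
  intro n _
  rw [PySem.Dict.getD_foldl_modify_append]
  simp [PySem.Dict.getD_empty]
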